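-- pv_equiv track=rewrite | github.com/OxQuasar/nous-memories | iching/spaceprobe/q3/round2_extended.py | pair_permute
-- ===== SOURCE A (Python) =====
-- def pair_permute(h, pair_perm):
--     """Apply a permutation of the 3 mirror pairs.
--     pair_perm maps pair index → pair index.
--     Pair 0 = O = {bit5, bit0}, Pair 1 = M = {bit4, bit1}, Pair 2 = I = {bit3, bit2}.
--     """
--     # Extract the two bits from each pair
--     pairs = [
--         ((h >> 5) & 1, (h >> 0) & 1),  # pair O: (bit5, bit0) = (L1, L6)
--         ((h >> 4) & 1, (h >> 1) & 1),  # pair M: (bit4, bit1) = (L2, L5)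
--         ((h >> 3) & 1, (h >> 2) & 1),  # pair I: (bit3, bit2) = (L3, L4)
--     ]
--     # Apply permutation: new pair at position i gets old pair at pair_perm[i]
--     new_pairs = [pairs[pair_perm[i]] for i in range(3)]
--     # Reconstruct hexagram
--     result = 0
--     result |= new_pairs[0][0] << 5 | new_pairs[0][1] << 0  # pair O positions
--     result |= new_pairs[1][0] << 4 | new_pairs[1][1] << 1  # pair M positions
--     result |= new_pairs[2][0] << 3 | new_pairs[2][1] << 2  # pair I positions
--     return result
-- ===== SOURCE B (Python) =====
-- def pair_permute(h, pair_perm):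
--     """Compose bit-position permutations: reduce pair_perm to a full 6-position
--     source map (source low-bit positions, then their mirrored high positions),
--     then OR each destination bit in from its source position in one pass."""
--     LO = (0, 1, 2)
--     half = [LO[pair_perm[i]] for i in range(3)]
--     src = half + [5 - j for j in reversed(half)]
--     out = 0
--     for p, s in enumerate(src):
--         out |= ((h >> s) & 1) << p
--     return out
-- ===== Notes on version B (the rewrite author's own statement) =====
-- stated objective: alternative
-- what changed: B reduces pair_perm to a full 6-entry source-position map over bit positions (source low positions from a table, then their mirrored high positions) and fills the result bit by bit in a single enumerate pass, instead of A's extraction of three (high,low) bit tuples that are permuted as tuples and reassembled pair by pair.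
import Mathlib
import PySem

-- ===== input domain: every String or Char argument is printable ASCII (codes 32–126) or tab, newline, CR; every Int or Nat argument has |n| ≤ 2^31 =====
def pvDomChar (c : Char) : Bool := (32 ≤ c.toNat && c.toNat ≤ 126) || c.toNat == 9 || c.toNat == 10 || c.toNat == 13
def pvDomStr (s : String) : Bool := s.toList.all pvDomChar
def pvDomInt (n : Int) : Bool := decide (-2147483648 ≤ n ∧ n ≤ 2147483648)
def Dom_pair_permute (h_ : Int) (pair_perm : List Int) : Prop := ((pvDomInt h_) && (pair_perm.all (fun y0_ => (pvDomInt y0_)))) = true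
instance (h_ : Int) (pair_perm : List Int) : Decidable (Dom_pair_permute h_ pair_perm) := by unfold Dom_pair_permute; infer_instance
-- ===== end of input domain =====

-- B composes bit-position permutations: it flattens pair_perm into a 6-entry source
-- map over bit positions and sets each destination bit in one pass, instead of A's
-- permuted list of (high,low) bit tuples reassembled pair by pair.

-- ===== PORT A =====
def pair_permute (h_ : Int) (pair_perm : List Int) : Int :=
  let pairs : List (Int × Int) :=
    [ (PySem.Int.band (h_ >>> (5 : Nat)) 1, PySem.Int.band (h_ >>> (0 : Nat)) 1)
    , (PySem.Int.band (h_ >>> (4 : Nat)) 1, PySem.Int.band (h_ >>> (1 : Nat)) 1)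
    , (PySem.Int.band (h_ >>> (3 : Nat)) 1, PySem.Int.band (h_ >>> (2 : Nat)) 1) ]
  -- pairs[pair_perm[i]] raises IndexError where pyGet? is none: excluded by Pre_
  let new_pairs : List (Int × Int) :=
    (PySem.List.pyRange 0 3 1).map
      (fun i => (PySem.List.pyGet? pairs ((PySem.List.pyGet? pair_perm i).getD 0)).getD (0, 0))
  let np0 := (PySem.List.pyGet? new_pairs 0).getD (0, 0)
  let np1 := (PySem.List.pyGet? new_pairs 1).getD (0, 0)
  let np2 := (PySem.List.pyGet? new_pairs 2).getD (0, 0)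
  let result : Int := 0
  let result := PySem.Int.bor result (PySem.Int.bor (np0.1 <<< (5 : Nat)) (np0.2 <<< (0 : Nat)))
  let result := PySem.Int.bor result (PySem.Int.bor (np1.1 <<< (4 : Nat)) (np1.2 <<< (1 : Nat)))
  let result := PySem.Int.bor result (PySem.Int.bor (np2.1 <<< (3 : Nat)) (np2.2 <<< (2 : Nat)))
  result

-- ===== PORT B =====
-- Shift amounts in B are Python-nonnegative by construction (entries of LO, 5 - an
-- entry of LO, and the enumerate index), so '.toNat' on them is exact.
-- LO[pair_perm[i]] raises IndexError where pyGet? is none: excluded by Pre_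
def pair_permute_alt (h_ : Int) (pair_perm : List Int) : Int :=
  let LO : List Int := [0, 1, 2]
  let half : List Int :=
    (PySem.List.pyRange 0 3 1).map
      (fun i => (PySem.List.pyGet? LO ((PySem.List.pyGet? pair_perm i).getD 0)).getD 0)
  let src : List Int := half ++ half.reverse.map (fun j => 5 - j)
  (PySem.List.enumerate src).foldl
    (fun out ps =>
      PySem.Int.bor out ((PySem.Int.band (h_ >>> ps.2.toNat) 1) <<< ps.1.toNat))
    0

-- ===== PRECONDITION & SPEC =====
-- A raises IndexError when pair_perm has fewer than 3 entries or one of its first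
-- three entries lies outside [-3,3); exactly those inputs are excluded.
def Pre_pair_permute (h_ : Int) (pair_perm : List Int) : Prop :=
  3 ≤ pair_perm.length ∧ ∀ j ∈ pair_perm.take 3, -3 ≤ j ∧ j < 3
instance (h_ : Int) (pair_perm : List Int) : Decidable (Pre_pair_permute h_ pair_perm) := by
  unfold Pre_pair_permute; infer_instance

def pvWitness_pair_permute : Int × List Int := (42, [2, 0, 1])

def Spec_pair_permute (h_ : Int) (pair_perm : List Int) (out : Int) : Prop := out = pair_permute_alt h_ pair_perm
instance (h_ : Int) (pair_perm : List Int) (out : Int) : Decidable (Spec_pair_permute h_ pair_perm out) := by unfold Spec_pair_permute; infer_instance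

-- ===== CLAIM (what is proved, stated in full; the proofs are below) =====
def Claim_equal_pair_permute : Prop := ∀ (h_ : Int) (pair_perm : List Int), Dom_pair_permute h_ pair_perm → Pre_pair_permute h_ pair_perm → Spec_pair_permute h_ pair_perm (pair_permute h_ pair_perm)

-- ===== LEMMAS AND PROOFS =====

-- every masked bit is 0 or 1
theorem band_one_bit (a : Int) : PySem.Int.band a 1 = 0 ∨ PySem.Int.band a 1 = 1 := by
  rw [PySem.Int.band_one]
  unfold PySem.Int.mod
  rw [Int.fmod_eq_emod]
  simp only [show (0:Int) ≤ 2 by norm_num, true_or, if_pos, add_zero]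
  omega

-- A's pair-by-pair OR tree equals B's left fold over destination bits 0..5,
-- when the six atoms are single bits shifted to the six positions
theorem orkey (b0 b1 b2 b3 b4 b5 : Int)
    (h0 : b0 = 0 ∨ b0 = 1) (h1 : b1 = 0 ∨ b1 = 1) (h2 : b2 = 0 ∨ b2 = 1)
    (h3 : b3 = 0 ∨ b3 = 1) (h4 : b4 = 0 ∨ b4 = 1) (h5 : b5 = 0 ∨ b5 = 1) :
    PySem.Int.bor (PySem.Int.bor (PySem.Int.bor 0 (PySem.Int.bor (b5 <<< (5:Nat)) (b0 <<< (0:Nat)))) (PySem.Int.bor (b4 <<< (4:Nat)) (b1 <<< (1:Nat)))) (PySem.Int.bor (b3 <<< (3:Nat)) (b2 <<< (2:Nat)))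
    = PySem.Int.bor (PySem.Int.bor (PySem.Int.bor (PySem.Int.bor (PySem.Int.bor (PySem.Int.bor 0 (b0 <<< (0:Nat))) (b1 <<< (1:Nat))) (b2 <<< (2:Nat))) (b3 <<< (3:Nat))) (b4 <<< (4:Nat))) (b5 <<< (5:Nat)) := by
  rcases h0 with rfl | rfl <;> rcases h1 with rfl | rfl <;> rcases h2 with rfl | rfl <;>
    rcases h3 with rfl | rfl <;> rcases h4 with rfl | rfl <;> rcases h5 with rfl | rfl <;> decide

-- A's tuple extracted at j carries the bits B reads at positions 5 - LO[j] and LO[j]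
theorem slot_eq (h_ j : Int) (l : -3 ≤ j) (u : j < 3) :
    (PySem.List.pyGet?
      [ (PySem.Int.band (h_ >>> (5 : Nat)) 1, PySem.Int.band (h_ >>> (0 : Nat)) 1)
      , (PySem.Int.band (h_ >>> (4 : Nat)) 1, PySem.Int.band (h_ >>> (1 : Nat)) 1)
      , (PySem.Int.band (h_ >>> (3 : Nat)) 1, PySem.Int.band (h_ >>> (2 : Nat)) 1) ] j).getD (0, 0)
    = (PySem.Int.band (h_ >>> (5 - (PySem.List.pyGet? ([0, 1, 2] : List Int) j).getD 0).toNat) 1,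
       PySem.Int.band (h_ >>> ((PySem.List.pyGet? ([0, 1, 2] : List Int) j).getD 0).toNat) 1) := by
  interval_cases j <;> rfl

theorem pair_permute_core (h_ j0 j1 j2 : Int) (t : List Int)
    (hj0 : -3 ≤ j0 ∧ j0 < 3) (hj1 : -3 ≤ j1 ∧ j1 < 3) (hj2 : -3 ≤ j2 ∧ j2 < 3) :
    pair_permute h_ (j0 :: j1 :: j2 :: t) = pair_permute_alt h_ (j0 :: j1 :: j2 :: t) := by
  have hr : PySem.List.pyRange 0 3 1 = [0, 1, 2] := by decide
  simp only [pair_permute, pair_permute_alt, hr, List.map, List.reverse_cons,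
    List.reverse_nil, List.nil_append, List.cons_append,
    PySem.List.enumerate_cons, PySem.List.enumerate_nil, List.foldl,
    PySem.List.pyGet?_ofNat', List.getElem?_cons_zero, List.getElem?_cons_succ,
    Option.getD_some, Int.toNat_zero,
    slot_eq h_ j0 hj0.1 hj0.2, slot_eq h_ j1 hj1.1 hj1.2, slot_eq h_ j2 hj2.1 hj2.2]
  simp only [Int.reduceAdd, Int.reduceToNat, Int.shiftRight_natCast_right, Int.shiftLeft_natCast_right]
  exact orkey _ _ _ _ _ _ (band_one_bit _) (band_one_bit _) (band_one_bit _)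
    (band_one_bit _) (band_one_bit _) (band_one_bit _)

-- ===== VERDICT (by name: the statement is the Claim_ definition above) =====
theorem pair_permute_spec : Claim_equal_pair_permute := by
  intro h_ pair_perm _ hpre
  obtain ⟨hlen, hmem⟩ := hpre
  match pair_perm, hlen with
  | j0 :: j1 :: j2 :: t, _ =>
    exact pair_permute_core h_ j0 j1 j2 t
      (hmem j0 (by simp)) (hmem j1 (by simp)) (hmem j2 (by simp))
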